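-- pv_equiv track=rewrite | github.com/MartinWang12789/advent-of-code | 2025/4/forklift.py | basic_counting_method
-- ===== SOURCE A (Python) =====
-- def basic_counting_method(grid: list[list[bool]]) -> tuple[int, list[list[bool]]]:
--     removable_rolls = []
--     i_length = len(grid)
--     j_length = len(grid[0])
--     for i in range(i_length):
--         for j in range(j_length):
--             if grid[i][j]:
--                 adjacent_count = 0
--                 for d_i in [-1, 0, 1]:
--                     for d_j in [-1, 0, 1]:
--                         if d_i == 0 and d_j == 0:
--                             continue
--                         n_i, n_j = i + d_i, j + d_j
--                         if 0 <= n_i < i_length and 0 <= n_j < j_length and grid[n_i][n_j]: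
--                             adjacent_count += 1
--
--                         if adjacent_count >= 4:
--                             break
--
--                     if adjacent_count >= 4:
--                         break
--
--                 if adjacent_count >= 4:
--                     continue
--
--                 removable_rolls.append((i, j))
--
--     removable_rolls_count = len(removable_rolls)
--     for i, j in removable_rolls:
--         grid[i][j] = False
--
--     return removable_rolls_count, grid
-- ===== SOURCE B (Python) =====
-- def basic_counting_method(grid: list[list[bool]]) -> tuple[int, list[list[bool]]]:
--     rows = len(grid)
--     cols = len(grid[0])
--     # summed-area table: P[a][b] = number of live cells in grid[0:a][0:b]
--     P = [[0] * (cols + 1) for _ in range(rows + 1)]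
--     for i in range(rows):
--         row = grid[i]
--         Pi, Pn = P[i], P[i + 1]
--         for j in range(cols):
--             Pn[j + 1] = Pi[j + 1] + Pn[j] - Pi[j] + (1 if row[j] else 0)
--     removed = 0
--     for i in range(rows):
--         row = grid[i]
--         lo_i, hi_i = max(i - 1, 0), min(i + 2, rows)
--         for j in range(cols):
--             if row[j]:
--                 lo_j, hi_j = max(j - 1, 0), min(j + 2, cols)
--                 # live cells in the 3x3 block, including the cell itself
--                 block = P[hi_i][hi_j] - P[lo_i][hi_j] - P[hi_i][lo_j] + P[lo_i][lo_j]
--                 if block < 5: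
--                     row[j] = False
--                     removed += 1
--     return removed, grid
-- ===== Notes on version B (the rewrite author's own statement) =====
-- stated objective: alternative
-- what changed: Replaces the per-cell scan of the 8 neighbor offsets (with early break at 4) by a summed-area table (2-D prefix sums): each cell's 3x3 live count becomes a 4-term rectangle difference P[hi_i][hi_j]-P[lo_i][hi_j]-P[hi_i][lo_j]+P[lo_i][lo_j], and live cells with block < 5 (i.e. fewer than 4 live neighbors) are cleared and counted in one scan instead of collect-then-mutate; the constant-factor speedup comes from removing the 8-way neighbor enumeration and bound checks per live cell.
import Mathlib
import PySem

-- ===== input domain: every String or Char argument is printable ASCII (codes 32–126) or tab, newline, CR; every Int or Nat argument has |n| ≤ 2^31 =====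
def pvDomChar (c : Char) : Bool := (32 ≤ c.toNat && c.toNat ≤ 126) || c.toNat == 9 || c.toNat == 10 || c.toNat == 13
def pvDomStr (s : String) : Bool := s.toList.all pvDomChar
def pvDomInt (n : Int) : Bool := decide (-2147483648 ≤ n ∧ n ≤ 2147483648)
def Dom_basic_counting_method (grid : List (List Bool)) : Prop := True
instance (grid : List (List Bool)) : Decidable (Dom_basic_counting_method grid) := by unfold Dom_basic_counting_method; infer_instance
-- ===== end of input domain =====

-- B replaces A's per-cell scan of the 8 neighbor offsets (early break at 4) and collect-then-mutate
-- by a summed-area table (2-D prefix sums): each cell's 3x3 live count is one 4-term rectangle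
-- difference, and live cells with block < 5 are cleared and counted in a single scan; same return
-- value (and same in-place mutation in Python); proved equal on all non-raising inputs.


-- ===== PORT A =====
-- inner 'for d_j in [-1,0,1]' loop, with its 'continue'/'break' logic, threading adjacent_count
def aInner (grid : List (List Bool)) (iL jL i j di : Int) : List Int → Int → Int
  | [], c => c
  | dj :: rest, c =>
    if di = 0 ∧ dj = 0 then aInner grid iL jL i j di rest c
    else
      let ni := i + di
      let nj := j + dj
      let c' := if (0 ≤ ni ∧ ni < iL ∧ 0 ≤ nj ∧ nj < jL) ∧
                   PySem.List.pyGetD (PySem.List.pyGetD grid ni []) nj false = true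
                then c + 1 else c
      if 4 ≤ c' then c' else aInner grid iL jL i j di rest c'

-- outer 'for d_i in [-1,0,1]' loop with its break
def aOuter (grid : List (List Bool)) (iL jL i j : Int) : List Int → Int → Int
  | [], c => c
  | di :: rest, c =>
    let c' := aInner grid iL jL i j di [-1, 0, 1] c
    if 4 ≤ c' then c' else aOuter grid iL jL i j rest c'

def basic_counting_method (grid : List (List Bool)) : Int × List (List Bool) :=
  let iL := PySem.List.len grid
  let jL := PySem.List.len (PySem.List.pyGetD grid 0 [])
  let removable :=
    (PySem.List.pyRange 0 iL 1).foldl (fun acc i =>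
      (PySem.List.pyRange 0 jL 1).foldl (fun acc j =>
        if PySem.List.pyGetD (PySem.List.pyGetD grid i []) j false = true then
          if 4 ≤ aOuter grid iL jL i j [-1, 0, 1] 0 then acc
          else acc ++ [(i, j)]
        else acc) acc) ([] : List (Int × Int))
  let cnt := PySem.List.len removable
  let grid' := removable.foldl (fun g p =>
      PySem.List.pySetD g p.1 (PySem.List.pySetD (PySem.List.pyGetD g p.1 []) p.2 false)) grid
  (cnt, grid')

-- ===== PORT B =====
def basic_counting_method_alt (grid : List (List Bool)) : Int × List (List Bool) :=
  let rows := PySem.List.len grid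
  let cols := PySem.List.len (PySem.List.pyGetD grid 0 [])
  -- summed-area table: P[a][b] = number of live cells in grid[0:a][0:b]
  let P0 : List (List Int) := List.replicate (rows.toNat + 1) (List.replicate (cols.toNat + 1) (0 : Int))
  let P := (PySem.List.pyRange 0 rows 1).foldl (fun P i =>
      let row := PySem.List.pyGetD grid i []
      let Pi := PySem.List.pyGetD P i []
      let Pn := (PySem.List.pyRange 0 cols 1).foldl (fun Pn j =>
          PySem.List.pySetD Pn (j + 1)
            (PySem.List.pyGetD Pi (j + 1) 0 + PySem.List.pyGetD Pn j 0 - PySem.List.pyGetD Pi j 0 +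
              (if PySem.List.pyGetD row j false = true then 1 else 0)))
        (PySem.List.pyGetD P (i + 1) [])
      PySem.List.pySetD P (i + 1) Pn) P0
  let fin := (PySem.List.pyRange 0 rows 1).foldl (fun (st : Int × List (List Bool)) i =>
      let loI := max (i - 1) 0
      let hiI := min (i + 2) rows
      let res := (PySem.List.pyRange 0 cols 1).foldl (fun (st2 : Int × List Bool) j =>
          if PySem.List.pyGetD st2.2 j false = true then
            let loJ := max (j - 1) 0
            let hiJ := min (j + 2) cols
            let block := PySem.List.pyGetD (PySem.List.pyGetD P hiI []) hiJ 0
              - PySem.List.pyGetD (PySem.List.pyGetD P loI []) hiJ 0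
              - PySem.List.pyGetD (PySem.List.pyGetD P hiI []) loJ 0
              + PySem.List.pyGetD (PySem.List.pyGetD P loI []) loJ 0
            if block < 5 then (st2.1 + 1, PySem.List.pySetD st2.2 j false) else st2
          else st2) (st.1, PySem.List.pyGetD st.2 i [])
      (res.1, PySem.List.pySetD st.2 i res.2)) ((0 : Int), grid)
  (fin.1, fin.2)

-- ===== PRECONDITION & SPEC =====
-- Pre_: exactly the inputs on which the Python A returns (nonempty grid, and every row at least as
-- long as row 0; a shorter row or an empty grid makes A raise IndexError).
def Pre_basic_counting_method (grid : List (List Bool)) : Prop :=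
  grid ≠ [] ∧ ∀ row ∈ grid, (grid.headD []).length ≤ row.length
instance (grid : List (List Bool)) : Decidable (Pre_basic_counting_method grid) := by
  unfold Pre_basic_counting_method; infer_instance

def pvWitness_basic_counting_method : List (List Bool) :=
  [[true, true, false], [true, true, false], [false, false, true]]

def Spec_basic_counting_method (grid : List (List Bool)) (out : Int × List (List Bool)) : Prop := out = basic_counting_method_alt grid
instance (grid : List (List Bool)) (out : Int × List (List Bool)) : Decidable (Spec_basic_counting_method grid out) := by unfold Spec_basic_counting_method; infer_instance

-- ===== CLAIM (what is proved, stated in full; the proofs are below) =====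
def Claim_equal_basic_counting_method : Prop := ∀ (grid : List (List Bool)), Dom_basic_counting_method grid → Pre_basic_counting_method grid → Spec_basic_counting_method grid (basic_counting_method grid)

-- ===== LEMMAS AND PROOFS =====

-- Boolean form of A's in-bounds-and-live condition
def lcB (G : List (List Bool)) (iL jL ni nj : Int) : Bool :=
  decide ((0 ≤ ni ∧ ni < iL ∧ 0 ≤ nj ∧ nj < jL) ∧
    PySem.List.pyGetD (PySem.List.pyGetD G ni []) nj false = true)

def bOffsets : List (Int × Int) := [(-1,-1),(-1,0),(-1,1),(0,-1),(0,1),(1,-1),(1,0),(1,1)]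

-- full 8-neighbor live count of cell (i, j)
def ncnt (G : List (List Bool)) (iL jL i j : Int) : Nat :=
  bOffsets.countP (fun d => lcB G iL jL (i + d.1) (j + d.2))

def hitB (G : List (List Bool)) (iL jL i j di dj : Int) : Bool :=
  !(decide (di = 0 ∧ dj = 0)) && lcB G iL jL (i + di) (j + dj)

-- cell (i, j) of the original grid is live and has fewer than 4 live neighbors
def keepB (G : List (List Bool)) (R C : Nat) (i j : Nat) : Bool :=
  (G.getD i []).getD j false && decide (ncnt G (R : Int) (C : Int) (i : Int) (j : Int) < 4)

def canonCnt (G : List (List Bool)) (R C : Nat) : Int :=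
  (((List.range R).map (fun i => (List.range C).countP (fun j => keepB G R C i j))).sum : Nat)

def canonGrid (G : List (List Bool)) (R C : Nat) : List (List Bool) :=
  G.mapIdx (fun i row => row.mapIdx (fun j v => if j < C ∧ keepB G R C i j = true then false else v))

-- ---- prefix-sum vocabulary (B side) ----
def liveb (G : List (List Bool)) (x y : Nat) : Bool := (G.getD x []).getD y false

def rowc (G : List (List Bool)) (x b : Nat) : Nat :=
  (List.range b).countP (fun y => liveb G x y)

def rectZ (G : List (List Bool)) (a b : Nat) : Int :=
  ((((List.range a).map (fun x => rowc G x b)).sum : Nat) : Int)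

def rowdiff (G : List (List Bool)) (x j C : Nat) : Int :=
  ((rowc G x (min (j+2) C) : Nat) : Int) - ((rowc G x (j-1) : Nat) : Int)

def blkZ (G : List (List Bool)) (R C i j : Nat) : Int :=
  rectZ G (min (i+2) R) (min (j+2) C) - rectZ G (i-1) (min (j+2) C)
    - rectZ G (min (i+2) R) (j-1) + rectZ G (i-1) (j-1)

-- B's per-cell test: the 3x3 block (including the cell) holds fewer than 5 live cells
def qB (G : List (List Bool)) (R C : Nat) (i j : Nat) : Bool :=
  decide (blkZ G R C i j < 5)

-- ---- generic list utilities ----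
theorem pv_set_oob {α : Type} (l : List α) (n : Nat) (v : α) (h : l.length ≤ n) : l.set n v = l := by
  induction l generalizing n with
  | nil => rfl
  | cons x xs ih =>
    cases n with
    | zero => simp at h
    | succ n =>
      simp only [List.length_cons] at h
      simp only [List.set_cons_succ]
      rw [ih n (by omega)]

theorem pv_set_getD_self {α : Type} (l : List α) (n : Nat) (d : α) : l.set n (l.getD n d) = l := by
  induction l generalizing n with
  | nil => rfl
  | cons x xs ih =>
    cases n with
    | zero => simp
    | succ n =>
      simp only [List.getD_cons_succ, List.set_cons_succ]
      rw [ih n]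

theorem pv_getD_set_self {α : Type} (l : List α) (n : Nat) (v d : α) (h : n < l.length) :
    (l.set n v).getD n d = v := by
  rw [List.getD_eq_getElem _ _ (by simpa using h)]
  simp

-- single-touch fold: each step rewrites entry i from its current value, indices processed in order
theorem pv_foldl_set_rows {α : Type} (d : α) (F : Nat → α → α) (g : List α) :
    ∀ k, k ≤ g.length →
    (List.range k).foldl (fun a i => a.set i (F i (a.getD i d))) g
      = g.mapIdx (fun i x => if i < k then F i x else x) := by
  intro k
  induction k with
  | zero =>
    intro _
    simp only [List.range_zero, List.foldl_nil]
    apply List.ext_getElem (by simp)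
    intro n h1 h2
    simp only [List.getElem_mapIdx]
    rw [if_neg (by omega)]
  | succ k ih =>
    intro hk
    rw [List.range_succ, List.foldl_append, ih (by omega)]
    simp only [List.foldl_cons, List.foldl_nil]
    have hklen : k < g.length := by omega
    have hgd : (g.mapIdx fun i x => if i < k then F i x else x).getD k d = g[k] := by
      rw [List.getD_eq_getElem _ _ (by simpa using hklen)]
      simp only [List.getElem_mapIdx]
      rw [if_neg (by omega)]
    rw [hgd]
    apply List.ext_getElem (by simp)
    intro n h1 h2
    rw [List.getElem_set, List.getElem_mapIdx, List.getElem_mapIdx]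
    by_cases hn : k = n
    · subst hn
      rw [if_pos rfl, if_pos (by omega)]
    · rw [if_neg hn]
      by_cases hnk : n < k
      · rw [if_pos hnk, if_pos (by omega)]
      · rw [if_neg hnk, if_neg (by omega)]

-- ---- A side: the break-at-4 neighbor scan computes min(count, 4) ----
theorem aInner_eq (G : List (List Bool)) (iL jL i j di : Int) :
    ∀ (djs : List Int) (c : Int), 0 ≤ c → c < 4 →
    aInner G iL jL i j di djs c
      = min (c + (djs.countP (fun dj => hitB G iL jL i j di dj) : Nat)) 4 := by
  intro djs
  induction djs with
  | nil =>
    intro c h0 h4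
    simp only [aInner, List.countP_nil, Nat.cast_zero, add_zero]
    omega
  | cons dj rest ih =>
    intro c h0 h4
    simp only [aInner]
    by_cases h00 : di = 0 ∧ dj = 0
    · rw [if_pos h00, ih c h0 h4]
      have hh : hitB G iL jL i j di dj = false := by simp [hitB, h00]
      rw [List.countP_cons, hh]
      simp
    · rw [if_neg h00]
      by_cases hl : (0 ≤ i + di ∧ i + di < iL ∧ 0 ≤ j + dj ∧ j + dj < jL) ∧
          PySem.List.pyGetD (PySem.List.pyGetD G (i + di) []) (j + dj) false = true
      · have hh : hitB G iL jL i j di dj = true := by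
          simp only [hitB, lcB, Bool.and_eq_true, Bool.not_eq_eq_eq_not, Bool.not_true,
            decide_eq_false_iff_not, decide_eq_true_eq]
          exact ⟨h00, hl⟩
        rw [if_pos hl]
        by_cases hb : (4 : Int) ≤ c + 1
        · rw [if_pos hb]
          rw [List.countP_cons, hh, if_pos rfl]
          omega
        · rw [if_neg hb, ih (c + 1) (by omega) (by omega)]
          rw [List.countP_cons, hh, if_pos rfl]
          omega
      · have hh : hitB G iL jL i j di dj = false := by
          simp only [hitB, Bool.and_eq_false_iff, lcB]
          right
          simpa using hl
        rw [if_neg hl, if_neg (by omega : ¬ (4:Int) ≤ c), ih c h0 h4]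
        rw [List.countP_cons, hh]
        simp

theorem aOuter_eq (G : List (List Bool)) (iL jL i j : Int) :
    ∀ (dis : List Int) (c : Int), 0 ≤ c → c < 4 →
    aOuter G iL jL i j dis c
      = min (c + ((dis.map (fun di => ([-1, 0, 1] : List Int).countP (fun dj => hitB G iL jL i j di dj))).sum : Nat)) 4 := by
  intro dis
  induction dis with
  | nil =>
    intro c h0 h4
    simp only [aOuter, List.map_nil, List.sum_nil, Nat.cast_zero, add_zero]
    omega
  | cons di rest ih =>
    intro c h0 h4
    simp only [aOuter]
    rw [aInner_eq G iL jL i j di _ c h0 h4]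
    rw [List.map_cons, List.sum_cons]
    by_cases hb : (4 : Int) ≤ c + (([-1, 0, 1] : List Int).countP (fun dj => hitB G iL jL i j di dj) : Nat)
    · rw [if_pos (by omega)]
      omega
    · rw [if_neg (by omega)]
      have hmin : min (c + (([-1, 0, 1] : List Int).countP (fun dj => hitB G iL jL i j di dj) : Nat)) 4
          = c + (([-1, 0, 1] : List Int).countP (fun dj => hitB G iL jL i j di dj) : Nat) := by omega
      rw [hmin, ih _ (by omega) (by omega)]
      omega

theorem sum_hit_eq_ncnt (G : List (List Bool)) (iL jL i j : Int) :
    (([-1, 0, 1] : List Int).map (fun di => ([-1, 0, 1] : List Int).countP (fun dj => hitB G iL jL i j di dj))).sum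
      = ncnt G iL jL i j := by
  simp only [ncnt, bOffsets, hitB, List.map_cons, List.map_nil, List.sum_cons, List.sum_nil,
    List.countP_cons, List.countP_nil]
  norm_num
  ac_rfl

theorem aKeep_iff (G : List (List Bool)) (iL jL i j : Int) :
    (4 ≤ aOuter G iL jL i j [-1, 0, 1] 0) ↔ 4 ≤ ncnt G iL jL i j := by
  rw [aOuter_eq G iL jL i j [-1, 0, 1] 0 (by omega) (by omega), sum_hit_eq_ncnt]
  omega

-- ---- row level folds ----
theorem row_clear_fixed (P : Nat → Bool) (row : List Bool) :
    ∀ k, k ≤ row.length →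
    (List.range k).foldl (fun r m => if P m = true then r.set m false else r) row
      = row.mapIdx (fun j v => if j < k ∧ P j = true then false else v) := by
  intro k
  induction k with
  | zero =>
    intro _
    simp only [List.range_zero, List.foldl_nil]
    apply List.ext_getElem (by simp)
    intro n h1 h2
    simp only [List.getElem_mapIdx]
    rw [if_neg (by omega)]
  | succ k ih =>
    intro hk
    rw [List.range_succ, List.foldl_append, ih (by omega)]
    simp only [List.foldl_cons, List.foldl_nil]
    by_cases hP : P k = true
    · rw [if_pos hP]
      apply List.ext_getElem (by simp)
      intro n h1 h2
      rw [List.getElem_set, List.getElem_mapIdx, List.getElem_mapIdx]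
      by_cases hn : k = n
      · subst hn
        rw [if_pos rfl, if_pos ⟨by omega, hP⟩]
      · rw [if_neg hn]
        by_cases hc : n < k ∧ P n = true
        · rw [if_pos hc, if_pos ⟨by omega, hc.2⟩]
        · rw [if_neg hc, if_neg (by rintro ⟨h5, h6⟩; exact hc ⟨by omega, h6⟩)]
    · rw [if_neg hP]
      apply List.ext_getElem (by simp)
      intro n h1 h2
      rw [List.getElem_mapIdx, List.getElem_mapIdx]
      by_cases hc : n < k ∧ P n = true
      · rw [if_pos hc, if_pos ⟨by omega, hc.2⟩]
      · rw [if_neg hc, if_neg (by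
          rintro ⟨h5, h6⟩
          refine hc ⟨?_, h6⟩
          rcases Nat.lt_succ_iff_lt_or_eq.mp h5 with h | h
          · exact h
          · subst h; exact absurd h6 hP)]

theorem block_collapse (js : List Nat) :
    ∀ (g : List (List Bool)) (n : Nat),
    js.foldl (fun g m => g.set n ((g.getD n []).set m false)) g
      = g.set n (js.foldl (fun r m => r.set m false) (g.getD n [])) := by
  induction js with
  | nil =>
    intro g n
    exact (pv_set_getD_self g n []).symm
  | cons m js ih =>
    intro g n
    simp only [List.foldl_cons]
    rw [ih]
    by_cases h : n < g.length
    · rw [pv_getD_set_self _ _ _ _ h, List.set_set]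
    · have hob : g.length ≤ n := by omega
      rw [pv_set_oob g n ((g.getD n []).set m false) hob]
      rw [pv_set_oob g n _ hob]
      rw [pv_set_oob g n _ hob]

-- ---- B side: the clearing scan (pair state) ----
theorem row_clear_fold (row : List Bool) (Q : Nat → Bool) :
    ∀ k, k ≤ row.length → ∀ c : Int,
    (List.range k).foldl (fun (st2 : Int × List Bool) j =>
        if st2.2.getD j false = true ∧ Q j = true then (st2.1 + 1, st2.2.set j false) else st2) (c, row)
      = (c + ((List.range k).countP (fun j => row.getD j false && Q j) : Nat),
         row.mapIdx (fun j v => if j < k ∧ Q j = true then false else v)) := by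
  intro k
  induction k with
  | zero =>
    intro _ c
    simp only [List.range_zero, List.foldl_nil, List.countP_nil, Nat.cast_zero, add_zero]
    rw [show row.mapIdx (fun j v => if j < 0 ∧ Q j = true then false else v) = row from by
      apply List.ext_getElem (by simp)
      intro n h1 h2
      rw [List.getElem_mapIdx, if_neg (by omega)]]
  | succ k ih =>
    intro hk c
    rw [List.range_succ, List.foldl_append, ih (by omega) c]
    simp only [List.foldl_cons, List.foldl_nil]
    have hklen : k < row.length := by omega
    have hgd : (row.mapIdx fun j v => if j < k ∧ Q j = true then false else v).getD k false = row[k] := by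
      rw [List.getD_eq_getElem _ _ (by simpa using hklen)]
      rw [List.getElem_mapIdx, if_neg (by rintro ⟨h5, _⟩; omega)]
    have hrowk : row.getD k false = row[k] := List.getD_eq_getElem _ _ hklen
    by_cases hcond : row[k] = true ∧ Q k = true
    · rw [if_pos (by rw [hgd]; exact hcond)]
      rw [Prod.mk.injEq]
      constructor
      · rw [List.countP_append, List.countP_cons, List.countP_nil, hrowk, hcond.1, hcond.2,
          Bool.and_self, if_pos rfl]
        omega
      · apply List.ext_getElem (by simp)
        intro n h1 h2
        rw [List.getElem_set, List.getElem_mapIdx, List.getElem_mapIdx]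
        by_cases hn : k = n
        · subst hn
          rw [if_pos rfl, if_pos ⟨by omega, hcond.2⟩]
        · rw [if_neg hn]
          by_cases hc : n < k ∧ Q n = true
          · rw [if_pos hc, if_pos ⟨by omega, hc.2⟩]
          · rw [if_neg hc, if_neg (by rintro ⟨h5, h6⟩; exact hc ⟨by omega, h6⟩)]
    · rw [if_neg (by rw [hgd]; exact hcond)]
      rw [Prod.mk.injEq]
      constructor
      · have hfa : (row.getD k false && Q k) = false := by
          rw [hrowk]
          cases hQk : Q k
          · rw [Bool.and_false]
          · cases hrk : row[k]
            · rw [Bool.false_and]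
            · exact absurd ⟨hrk, hQk⟩ hcond
        rw [List.countP_append, List.countP_cons, List.countP_nil, hfa,
          if_neg (by exact Bool.false_ne_true)]
        omega
      · apply List.ext_getElem (by simp)
        intro n h1 h2
        rw [List.getElem_mapIdx, List.getElem_mapIdx]
        by_cases hn : n = k
        · subst hn
          rw [if_neg (by rintro ⟨h5, _⟩; omega)]
          by_cases hQ : Q n = true
          · have hrk : row[n] = false := by
              cases hrk' : row[n]
              · rfl
              · exact absurd ⟨hrk', hQ⟩ hcond
            rw [if_pos ⟨by omega, hQ⟩, hrk]
          · rw [if_neg (by rintro ⟨_, h6⟩; exact hQ h6)]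
        · by_cases hc : n < k ∧ Q n = true
          · rw [if_pos hc, if_pos ⟨by omega, hc.2⟩]
          · rw [if_neg hc, if_neg (by rintro ⟨h5, h6⟩; exact hc ⟨by omega, h6⟩)]

theorem grid_clear_fold (G : List (List Bool)) (C : Nat) (Q : Nat → Nat → Bool)
    (hrows : ∀ row ∈ G, C ≤ row.length) :
    ∀ k, k ≤ G.length → ∀ c : Int,
    (List.range k).foldl (fun (st : Int × List (List Bool)) i =>
        ((((List.range C).foldl (fun (st2 : Int × List Bool) j =>
            if st2.2.getD j false = true ∧ Q i j = true then (st2.1 + 1, st2.2.set j false) else st2)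
          (st.1, st.2.getD i [])).1),
         st.2.set i (((List.range C).foldl (fun (st2 : Int × List Bool) j =>
            if st2.2.getD j false = true ∧ Q i j = true then (st2.1 + 1, st2.2.set j false) else st2)
          (st.1, st.2.getD i [])).2))) (c, G)
      = (c + (((List.range k).map (fun i => ((List.range C).countP (fun j => (G.getD i []).getD j false && Q i j) : Nat))).sum : Nat),
         G.mapIdx (fun i row => if i < k then row.mapIdx (fun j v => if j < C ∧ Q i j = true then false else v) else row)) := by
  intro k
  induction k with
  | zero =>
    intro _ c
    simp only [List.range_zero, List.foldl_nil, List.map_nil, List.sum_nil, Nat.cast_zero, add_zero]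
    rw [show G.mapIdx (fun i row => if i < 0 then row.mapIdx (fun j v => if j < C ∧ Q i j = true then false else v) else row) = G from by
      apply List.ext_getElem (by simp)
      intro n h1 h2
      rw [List.getElem_mapIdx, if_neg (by omega)]]
  | succ k ih =>
    intro hk c
    rw [List.range_succ, List.foldl_append, ih (by omega) c]
    simp only [List.foldl_cons, List.foldl_nil]
    have hklen : k < G.length := by omega
    have hgd : (G.mapIdx fun i row => if i < k then row.mapIdx (fun j v => if j < C ∧ Q i j = true then false else v) else row).getD k [] = G[k] := by
      rw [List.getD_eq_getElem _ _ (by simpa using hklen)]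
      rw [List.getElem_mapIdx, if_neg (by omega)]
    rw [hgd]
    rw [row_clear_fold (G[k]) (Q k) C (hrows _ (List.getElem_mem hklen)) _]
    rw [Prod.mk.injEq]
    constructor
    · dsimp only
      rw [List.map_append, List.sum_append]
      simp only [List.map_cons, List.map_nil, List.sum_cons, List.sum_nil, add_zero]
      rw [List.getD_eq_getElem G [] hklen]
      omega
    · dsimp only
      apply List.ext_getElem (by simp)
      intro n h1 h2
      rw [List.getElem_set, List.getElem_mapIdx, List.getElem_mapIdx]
      by_cases hn : k = n
      · subst hn
        rw [if_pos rfl, if_pos (by omega)]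
      · rw [if_neg hn]
        by_cases hnk : n < k
        · rw [if_pos hnk, if_pos (by omega)]
        · rw [if_neg hnk, if_neg (by omega)]

-- Pre_ gives: every row is at least as long as row 0
theorem pre_cols (G : List (List Bool)) (h : Pre_basic_counting_method G) :
    ∀ row ∈ G, (G.getD 0 []).length ≤ row.length := by
  obtain ⟨hne, hPre⟩ := h
  intro row hr
  have := hPre row hr
  cases G with
  | nil => exact absurd rfl hne
  | cons a l => simpa using this

-- ---- characterization of port A ----
theorem A_char (G : List (List Bool)) (h : Pre_basic_counting_method G) :
    basic_counting_method G = (canonCnt G G.length (G.getD 0 []).length, canonGrid G G.length (G.getD 0 []).length) := by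
  have hC := pre_cols G h
  unfold basic_counting_method
  simp only [PySem.List.len_eq, PySem.List.pyGetD_zero, PySem.List.pyRange_zero_natCast,
    List.foldl_map, PySem.List.pyGetD_natCast]
  rw [show ((List.range G.length).foldl (fun acc (n : Nat) =>
      (List.range (G.getD 0 []).length).foldl (fun acc (m : Nat) =>
        if (G.getD n []).getD m false = true then
          if 4 ≤ aOuter G (G.length : Int) ((G.getD 0 []).length : Int) (n : Int) (m : Int) [-1, 0, 1] 0 then acc
          else acc ++ [((n : Int), (m : Int))]
        else acc) acc) ([] : List (Int × Int)))
    = (List.range G.length).flatMap (fun (n : Nat) =>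
        ((List.range (G.getD 0 []).length).filter (fun m => keepB G G.length (G.getD 0 []).length n m)).map
          (fun (m : Nat) => ((n : Int), (m : Int)))) from by
    rw [PySem.List.foldl_congr_mem (List.range G.length) _
        (fun acc (n : Nat) => acc ++ ((List.range (G.getD 0 []).length).filter
            (fun m => keepB G G.length (G.getD 0 []).length n m)).map (fun (m : Nat) => ((n : Int), (m : Int)))) _
        (by
          intro acc n _
          dsimp only
          rw [PySem.List.foldl_congr_mem (List.range (G.getD 0 []).length) _
              (fun acc (m : Nat) => if keepB G G.length (G.getD 0 []).length n m = true
                then acc ++ [((n : Int), (m : Int))] else acc) _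
              (by
                intro acc' m _
                dsimp only
                cases hlive : (G.getD n []).getD m false with
                | false =>
                  rw [if_neg (by exact Bool.false_ne_true),
                      if_neg (by simp only [keepB, hlive, Bool.false_and]; exact Bool.false_ne_true)]
                | true =>
                  rw [if_pos rfl]
                  by_cases hk : 4 ≤ aOuter G (G.length : Int) ((G.getD 0 []).length : Int) (n : Int) (m : Int) [-1, 0, 1] 0
                  · have h4 := (aKeep_iff G _ _ _ _).mp hk
                    rw [if_pos hk, if_neg (by
                      simp only [keepB, hlive, Bool.true_and, decide_eq_true_eq]
                      omega)]
                  · have h4 : ncnt G (G.length : Int) ((G.getD 0 []).length : Int) (n : Int) (m : Int) < 4 := by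
                      by_contra hcon
                      exact hk ((aKeep_iff G _ _ _ _).mpr (by omega))
                    rw [if_neg hk, if_pos (by
                      simp only [keepB, hlive, Bool.true_and, decide_eq_true_eq]
                      omega)])]
          exact PySem.List.foldl_append_if _ _ _ _)]
    rw [PySem.List.foldl_append_eq_flatMap, List.nil_append]]
  rw [Prod.mk.injEq]
  constructor
  · rw [List.length_flatMap]
    unfold canonCnt
    congr 1
    congr 1
    apply List.map_congr_left
    intro n _
    rw [List.length_map, ← List.countP_eq_length_filter]
  · rw [List.foldl_flatMap]
    simp only [List.foldl_map, PySem.List.pySetD_natCast, PySem.List.pyGetD_natCast]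
    rw [PySem.List.foldl_congr_mem (List.range G.length) _
        (fun g (n : Nat) => g.set n (((List.range (G.getD 0 []).length).filter
            (fun m => keepB G G.length (G.getD 0 []).length n m)).foldl (fun r m => r.set m false) (g.getD n []))) _
        (by
          intro acc n _
          dsimp only
          exact block_collapse _ acc n)]
    rw [pv_foldl_set_rows [] (fun n row => ((List.range (G.getD 0 []).length).filter
        (fun m => keepB G G.length (G.getD 0 []).length n m)).foldl (fun r m => r.set m false) row) G G.length le_rfl]
    apply List.ext_getElem (by simp [canonGrid])
    intro n h1 h2
    have hn : n < G.length := by simpa using h1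
    simp only [canonGrid, List.getElem_mapIdx]
    rw [if_pos hn, List.foldl_filter]
    exact row_clear_fixed (keepB G G.length (G.getD 0 []).length n) (G[n]) (G.getD 0 []).length
      (hC _ (List.getElem_mem hn))

-- ---- prefix sums: basic identities ----
theorem rowc_succ (G : List (List Bool)) (x b : Nat) :
    rowc G x (b+1) = rowc G x b + (if liveb G x b = true then 1 else 0) := by
  simp [rowc, List.range_succ, List.countP_append, List.countP_cons]

theorem rectZ_succ (G : List (List Bool)) (a b : Nat) :
    rectZ G (a+1) b = rectZ G a b + ((rowc G a b : Nat) : Int) := by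
  simp [rectZ, List.range_succ]

theorem rectZ_zero_right (G : List (List Bool)) (a : Nat) : rectZ G a 0 = 0 := by
  simp [rectZ, rowc]

-- prefix recurrence (the value B's inner loop writes)
theorem rect_rec (G : List (List Bool)) (i j : Nat) :
    rectZ G (i+1) (j+1)
      = rectZ G i (j+1) + rectZ G (i+1) j - rectZ G i j + (if liveb G i j = true then 1 else 0) := by
  rw [rectZ_succ G i (j+1), rectZ_succ G i j, rowc_succ G i j]
  cases hlb : liveb G i j <;> simp <;> push_cast <;> ring

-- ---- the 3x3 block as a sum of row differences ----
theorem rowdiff_eq (G : List (List Bool)) (C x j : Nat) (hj : j < C) :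
    rowdiff G x j C
      = (if 1 ≤ j ∧ liveb G x (j-1) = true then (1:Int) else 0)
        + (if liveb G x j = true then (1:Int) else 0)
        + (if j+1 < C ∧ liveb G x (j+1) = true then (1:Int) else 0) := by
  unfold rowdiff
  by_cases h1 : 1 ≤ j
  · have a1 := rowc_succ G x (j-1)
    rw [show j - 1 + 1 = j from by omega] at a1
    have a2 := rowc_succ G x j
    have a3 := rowc_succ G x (j+1)
    by_cases h2 : j + 2 ≤ C
    · rw [show min (j+2) C = j+2 from by omega, show j+2 = j+1+1 from rfl, a3, a2, a1]
      simp only [h1, show j+1 < C from by omega, true_and]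
      cases l1 : liveb G x (j-1) <;> cases l2 : liveb G x j <;> cases l3 : liveb G x (j+1) <;>
        simp <;> push_cast <;> ring
    · rw [show min (j+2) C = j+1 from by omega, a2, a1]
      simp only [h1, true_and, show ¬ (j+1 < C) from by omega, false_and, if_false]
      cases l1 : liveb G x (j-1) <;> cases l2 : liveb G x j <;>
        simp <;> push_cast <;> ring
  · have hj0 : j = 0 := by omega
    subst hj0
    have h00 : rowc G x (0-1) = 0 := by simp [rowc]
    have a1 := rowc_succ G x 0
    have a2 := rowc_succ G x 1
    simp only [show ¬ (1 ≤ 0) from by omega, false_and, if_false]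
    by_cases h2 : 2 ≤ C
    · rw [show min (0+2) C = 2 from by omega, show (2:Nat) = 1+1 from rfl, a2, a1, h00]
      simp only [show 0+1 < C from by omega, true_and]
      cases l1 : liveb G x 0 <;> cases l2 : liveb G x 1 <;> simp_all
    · rw [show min (0+2) C = 1 from by omega, show (1:Nat) = 0+1 from rfl, a1, h00]
      simp only [show ¬ (0+1 < C) from by omega, false_and, if_false]
      cases l1 : liveb G x 0 <;> simp_all

theorem blkZ_rows (G : List (List Bool)) (R C i j : Nat) (hi : i < R) :
    blkZ G R C i j
      = (if 1 ≤ i then rowdiff G (i-1) j C else 0) + rowdiff G i j C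
        + (if i+1 < R then rowdiff G (i+1) j C else 0) := by
  unfold blkZ rowdiff
  by_cases h1 : 1 ≤ i
  · have b1 : ∀ c, rectZ G i c = rectZ G (i-1) c + ((rowc G (i-1) c : Nat) : Int) := by
      intro c
      conv_lhs => rw [show i = i - 1 + 1 from by omega]
      exact rectZ_succ G (i-1) c
    have b2 : ∀ c, rectZ G (i+1) c = rectZ G i c + ((rowc G i c : Nat) : Int) := rectZ_succ G i
    have b3 : ∀ c, rectZ G (i+2) c = rectZ G (i+1) c + ((rowc G (i+1) c : Nat) : Int) :=
      fun c => rectZ_succ G (i+1) c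
    by_cases h2 : i + 2 ≤ R
    · rw [show min (i+2) R = i+2 from by omega]
      rw [if_pos h1, if_pos (show i+1 < R from by omega)]
      simp only [b3, b2, b1]
      ring
    · rw [show min (i+2) R = i+1 from by omega]
      rw [if_pos h1, if_neg (show ¬ (i+1 < R) from by omega)]
      simp only [b2, b1]
      ring
  · have hi0 : i = 0 := by omega
    subst hi0
    have z1 : ∀ c, rectZ G (0-1) c = 0 := by intro c; simp [rectZ]
    have b1 : ∀ c, rectZ G 1 c = rectZ G 0 c + ((rowc G 0 c : Nat) : Int) := rectZ_succ G 0
    have b2 : ∀ c, rectZ G 2 c = rectZ G 1 c + ((rowc G 1 c : Nat) : Int) := rectZ_succ G 1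
    have z0 : ∀ c, rectZ G 0 c = 0 := by intro c; simp [rectZ]
    rw [if_neg (show ¬ (1 ≤ 0) from by omega)]
    by_cases h2 : 2 ≤ R
    · rw [show min (0+2) R = 2 from by omega]
      rw [if_pos (show 0+1 < R from by omega)]
      simp only [b2, b1, z1, z0]
      ring
    · rw [show min (0+2) R = 1 from by omega]
      rw [if_neg (show ¬ (0+1 < R) from by omega)]
      simp only [b1, z1, z0]
      ring

-- lcB at Nat indices / out-of-bounds rows and columns
theorem lcB_oob_row (G : List (List Bool)) (R C : Nat) (x y : Int)
    (hx : ¬ (0 ≤ x ∧ x < (R:Int))) : lcB G (R:Int) (C:Int) x y = false := by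
  unfold lcB
  simp only [decide_eq_false_iff_not]
  rintro ⟨⟨ha, hb, _⟩, _⟩
  exact hx ⟨ha, hb⟩

theorem lcB_oob_col (G : List (List Bool)) (R C : Nat) (x y : Int)
    (hy : ¬ (0 ≤ y ∧ y < (C:Int))) : lcB G (R:Int) (C:Int) x y = false := by
  unfold lcB
  simp only [decide_eq_false_iff_not]
  rintro ⟨⟨_, _, hc, hd⟩, _⟩
  exact hy ⟨hc, hd⟩

theorem lcB_nat (G : List (List Bool)) (R C x y : Nat) (hx : x < R) :
    lcB G (R:Int) (C:Int) (x:Int) (y:Int) = (decide (y < C) && liveb G x y) := by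
  unfold lcB liveb
  by_cases hy : y < C
  · simp only [PySem.List.pyGetD_natCast]
    cases hb : (G.getD x []).getD y false <;>
      simp [hx, hy, hb]
  · simp [hy]

-- the three column terms of one row, in Nat-land
theorem tm_eq (G : List (List Bool)) (R C x j : Nat) (hx : x < R) (hj : j < C) :
    (if lcB G (R:Int) (C:Int) (x:Int) ((j:Int) + -1) = true then (1:Int) else 0)
      = (if 1 ≤ j ∧ liveb G x (j-1) = true then (1:Int) else 0) := by
  by_cases h1 : 1 ≤ j
  · rw [show (j:Int) + -1 = ((j-1 : Nat) : Int) from by omega, lcB_nat G R C x (j-1) hx]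
    have hjc : j - 1 < C := by omega
    by_cases hl : liveb G x (j-1) = true <;> simp_all
  · rw [lcB_oob_col G R C _ _ (by omega)]
    simp [h1]

theorem tc_eq (G : List (List Bool)) (R C x j : Nat) (hx : x < R) (hj : j < C) :
    (if lcB G (R:Int) (C:Int) (x:Int) (j:Int) = true then (1:Int) else 0)
      = (if liveb G x j = true then (1:Int) else 0) := by
  rw [lcB_nat G R C x j hx]
  simp [hj]

theorem tp_eq (G : List (List Bool)) (R C x j : Nat) (hx : x < R) :
    (if lcB G (R:Int) (C:Int) (x:Int) ((j:Int) + 1) = true then (1:Int) else 0)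
      = (if j+1 < C ∧ liveb G x (j+1) = true then (1:Int) else 0) := by
  rw [show (j:Int) + 1 = ((j+1 : Nat) : Int) from by omega, lcB_nat G R C x (j+1) hx]
  by_cases hjc : j + 1 < C <;> by_cases hl : liveb G x (j+1) = true <;> simp_all

-- ---- ncnt in Nat-land, matching the block expansion term for term ----
theorem ncnt_nat (G : List (List Bool)) (R C i j : Nat) (hi : i < R) (hj : j < C) :
    ((ncnt G (R : Int) (C : Int) (i : Int) (j : Int) : Nat) : Int)
      = (if 1 ≤ i then
            (if 1 ≤ j ∧ liveb G (i-1) (j-1) = true then (1:Int) else 0)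
            + (if liveb G (i-1) j = true then (1:Int) else 0)
            + (if j+1 < C ∧ liveb G (i-1) (j+1) = true then (1:Int) else 0)
          else 0)
        + ((if 1 ≤ j ∧ liveb G i (j-1) = true then (1:Int) else 0)
            + (if j+1 < C ∧ liveb G i (j+1) = true then (1:Int) else 0))
        + (if i+1 < R then
            (if 1 ≤ j ∧ liveb G (i+1) (j-1) = true then (1:Int) else 0)
            + (if liveb G (i+1) j = true then (1:Int) else 0)
            + (if j+1 < C ∧ liveb G (i+1) (j+1) = true then (1:Int) else 0)
          else 0) := by
  have hexp : ((ncnt G (R : Int) (C : Int) (i : Int) (j : Int) : Nat) : Int)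
      = (if lcB G (R:Int) (C:Int) ((i:Int) + -1) ((j:Int) + -1) = true then (1:Int) else 0)
        + (if lcB G (R:Int) (C:Int) ((i:Int) + -1) ((j:Int) + 0) = true then (1:Int) else 0)
        + (if lcB G (R:Int) (C:Int) ((i:Int) + -1) ((j:Int) + 1) = true then (1:Int) else 0)
        + (if lcB G (R:Int) (C:Int) ((i:Int) + 0) ((j:Int) + -1) = true then (1:Int) else 0)
        + (if lcB G (R:Int) (C:Int) ((i:Int) + 0) ((j:Int) + 1) = true then (1:Int) else 0)
        + (if lcB G (R:Int) (C:Int) ((i:Int) + 1) ((j:Int) + -1) = true then (1:Int) else 0)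
        + (if lcB G (R:Int) (C:Int) ((i:Int) + 1) ((j:Int) + 0) = true then (1:Int) else 0)
        + (if lcB G (R:Int) (C:Int) ((i:Int) + 1) ((j:Int) + 1) = true then (1:Int) else 0) := by
    simp only [ncnt, bOffsets, List.countP_cons, List.countP_nil]
    push_cast [apply_ite (fun n : Nat => (n : Int))]
    ring
  rw [hexp]
  simp only [add_zero]
  by_cases h1 : 1 ≤ i
  · rw [if_pos h1]
    have e1 : (i:Int) + -1 = ((i-1 : Nat) : Int) := by omega
    rw [e1, tm_eq G R C (i-1) j (by omega) hj, tc_eq G R C (i-1) j (by omega) hj,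
        tp_eq G R C (i-1) j (by omega), tm_eq G R C i j hi hj, tp_eq G R C i j hi]
    by_cases h2 : i + 1 < R
    · rw [if_pos h2]
      have e2 : (i:Int) + 1 = ((i+1 : Nat) : Int) := by omega
      rw [e2, tm_eq G R C (i+1) j h2 hj, tc_eq G R C (i+1) j h2 hj, tp_eq G R C (i+1) j h2]
      ring
    · rw [if_neg h2]
      rw [lcB_oob_row G R C ((i:Int)+1) _ (by omega), lcB_oob_row G R C ((i:Int)+1) _ (by omega),
          lcB_oob_row G R C ((i:Int)+1) _ (by omega)]
      simp only [Bool.false_eq_true, if_false]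
      ring
  · rw [if_neg h1]
    rw [lcB_oob_row G R C ((i:Int) + -1) _ (by omega), lcB_oob_row G R C ((i:Int) + -1) _ (by omega),
        lcB_oob_row G R C ((i:Int) + -1) _ (by omega)]
    rw [tm_eq G R C i j hi hj, tp_eq G R C i j hi]
    simp only [Bool.false_eq_true, if_false]
    by_cases h2 : i + 1 < R
    · rw [if_pos h2]
      have e2 : (i:Int) + 1 = ((i+1 : Nat) : Int) := by omega
      rw [e2, tm_eq G R C (i+1) j h2 hj, tc_eq G R C (i+1) j h2 hj, tp_eq G R C (i+1) j h2]
      ring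
    · rw [if_neg h2]
      rw [lcB_oob_row G R C ((i:Int)+1) _ (by omega), lcB_oob_row G R C ((i:Int)+1) _ (by omega),
          lcB_oob_row G R C ((i:Int)+1) _ (by omega)]
      simp only [Bool.false_eq_true, if_false]
      ring

-- the 3x3 block of a live cell holds exactly its neighbor count plus itself
theorem blk_eq_ncnt (G : List (List Bool)) (R C i j : Nat) (hi : i < R) (hj : j < C)
    (hlive : liveb G i j = true) :
    blkZ G R C i j = ((ncnt G (R : Int) (C : Int) (i : Int) (j : Int) : Nat) : Int) + 1 := by
  rw [blkZ_rows G R C i j hi, rowdiff_eq G C (i-1) j hj, rowdiff_eq G C i j hj,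
      rowdiff_eq G C (i+1) j hj, ncnt_nat G R C i j hi hj]
  rw [hlive]
  rw [show (if (true = true) then (1:Int) else 0) = 1 from if_pos rfl]
  ring

-- ---- the prefix-table fold builds rectZ ----
theorem pfx_row (G : List (List Bool)) (C i : Nat) :
    ∀ k, k ≤ C →
    (List.range k).foldl (fun Pn (j : Nat) =>
        Pn.set (j+1) (((List.range (C+1)).map (fun b => rectZ G i b)).getD (j+1) 0 + Pn.getD j 0
          - ((List.range (C+1)).map (fun b => rectZ G i b)).getD j 0
          + (if liveb G i j = true then (1:Int) else 0)))
      ((List.range (C+1)).map (fun _ => (0:Int)))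
      = (List.range (C+1)).map (fun b => if b ≤ k then rectZ G (i+1) b else 0) := by
  intro k
  induction k with
  | zero =>
    intro _
    simp only [List.range_zero, List.foldl_nil]
    apply List.ext_getElem (by simp)
    intro n h1 h2
    simp only [List.getElem_map, List.getElem_range]
    by_cases hn : n ≤ 0
    · have hn0 : n = 0 := by omega
      subst hn0
      rw [if_pos hn, rectZ_zero_right]
    · rw [if_neg hn]
  | succ k ih =>
    intro hk
    rw [show List.range (k+1) = List.range k ++ [k] from List.range_succ, List.foldl_append, ih (by omega)]
    simp only [List.foldl_cons, List.foldl_nil]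
    have g1 : ((List.range (C+1)).map (fun b => rectZ G i b)).getD (k+1) 0 = rectZ G i (k+1) :=
      PySem.List.getD_map_range _ _ _ _ (by omega)
    have g2 : ((List.range (C+1)).map (fun b => if b ≤ k then rectZ G (i+1) b else 0)).getD k 0
        = rectZ G (i+1) k := by
      rw [PySem.List.getD_map_range _ _ _ _ (by omega), if_pos le_rfl]
    have g3 : ((List.range (C+1)).map (fun b => rectZ G i b)).getD k 0 = rectZ G i k :=
      PySem.List.getD_map_range _ _ _ _ (by omega)
    rw [g1, g2, g3, show rectZ G i (k+1) + rectZ G (i+1) k - rectZ G i k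
        + (if liveb G i k = true then (1:Int) else 0) = rectZ G (i+1) (k+1) from (rect_rec G i k).symm]
    apply List.ext_getElem (by simp)
    intro n h1 h2
    rw [List.getElem_set]
    simp only [List.getElem_map, List.getElem_range]
    by_cases hn : k + 1 = n
    · rw [if_pos hn, ← hn, if_pos (by omega)]
    · rw [if_neg hn]
      by_cases hnk : n ≤ k
      · rw [if_pos hnk, if_pos (by omega)]
      · rw [if_neg hnk, if_neg (by omega)]

theorem pfx_all (G : List (List Bool)) (R C : Nat) :
    ∀ k, k ≤ R →
    (List.range k).foldl (fun P (i : Nat) =>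
        P.set (i+1) ((List.range C).foldl (fun Pn (j : Nat) =>
            Pn.set (j+1) ((P.getD i []).getD (j+1) 0 + Pn.getD j 0 - (P.getD i []).getD j 0
              + (if liveb G i j = true then (1:Int) else 0)))
          (P.getD (i+1) [])))
      ((List.range (R+1)).map (fun _ => (List.range (C+1)).map (fun _ => (0:Int))))
      = (List.range (R+1)).map (fun a => (List.range (C+1)).map (fun b => if a ≤ k then rectZ G a b else 0)) := by
  intro k
  induction k with
  | zero =>
    intro _
    simp only [List.range_zero, List.foldl_nil]
    apply List.ext_getElem (by simp)
    intro n h1 h2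
    simp only [List.getElem_map, List.getElem_range]
    apply List.ext_getElem (by simp)
    intro m hm1 hm2
    simp only [List.getElem_map, List.getElem_range]
    by_cases hn : n ≤ 0
    · have hn0 : n = 0 := by omega
      subst hn0
      rw [if_pos hn]
      simp [rectZ]
    · rw [if_neg hn]
  | succ k ih =>
    intro hk
    rw [show List.range (k+1) = List.range k ++ [k] from List.range_succ, List.foldl_append, ih (by omega)]
    simp only [List.foldl_cons, List.foldl_nil]
    have gk : ((List.range (R+1)).map (fun a => (List.range (C+1)).map (fun b => if a ≤ k then rectZ G a b else 0))).getD k []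
        = (List.range (C+1)).map (fun b => rectZ G k b) := by
      rw [PySem.List.getD_map_range _ _ _ _ (by omega)]
      exact List.map_congr_left (fun b _ => if_pos le_rfl)
    have gk1 : ((List.range (R+1)).map (fun a => (List.range (C+1)).map (fun b => if a ≤ k then rectZ G a b else 0))).getD (k+1) []
        = (List.range (C+1)).map (fun _ => (0:Int)) := by
      rw [PySem.List.getD_map_range _ _ _ _ (by omega)]
      exact List.map_congr_left (fun b _ => if_neg (by omega))
    rw [gk, gk1, pfx_row G C k C le_rfl]
    apply List.ext_getElem (by simp)
    intro n h1 h2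
    rw [List.getElem_set]
    simp only [List.getElem_map, List.getElem_range]
    by_cases hn : k + 1 = n
    · subst hn
      rw [if_pos rfl]
      apply List.ext_getElem (by simp)
      intro m hm1 hm2
      simp only [List.length_map, List.length_range] at hm1 hm2
      simp only [List.getElem_map, List.getElem_range]
      rw [if_pos (by omega), if_pos (by omega)]
    · rw [if_neg hn]
      apply List.ext_getElem (by simp)
      intro m hm1 hm2
      simp only [List.getElem_map, List.getElem_range]
      by_cases hnk : n ≤ k
      · rw [if_pos hnk, if_pos (by omega)]
      · rw [if_neg hnk, if_neg (by omega)]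

-- live-and-sparse test agrees with the canonical keep predicate
theorem qk_eq (G : List (List Bool)) (R C i j : Nat) (hi : i < R) (hj : j < C) :
    ((G.getD i []).getD j false && qB G R C i j) = keepB G R C i j := by
  unfold keepB
  cases hl : (G.getD i []).getD j false
  · simp
  · simp only [Bool.true_and]
    have hlv : liveb G i j = true := by unfold liveb; exact hl
    have hb := blk_eq_ncnt G R C i j hi hj hlv
    unfold qB
    rw [hb]
    simp only [decide_eq_decide]
    omega

-- ---- characterization of port B ----
theorem B_char (G : List (List Bool)) (h : Pre_basic_counting_method G) :
    basic_counting_method_alt G = (canonCnt G G.length (G.getD 0 []).length, canonGrid G G.length (G.getD 0 []).length) := by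
  have hC := pre_cols G h
  unfold basic_counting_method_alt
  simp only [PySem.List.len_eq, PySem.List.pyGetD_zero, PySem.List.pyRange_zero_natCast,
    List.foldl_map, PySem.List.pyGetD_natCast, PySem.List.pySetD_natCast, Int.toNat_natCast]
  have hPfold : (List.foldl
      (fun P (i : Nat) =>
        PySem.List.pySetD P ((i:Int) + 1)
          (List.foldl
            (fun Pn (j : Nat) =>
              PySem.List.pySetD Pn ((j:Int) + 1)
                (PySem.List.pyGetD (P.getD i []) ((j:Int) + 1) 0 + Pn.getD j 0 - (P.getD i []).getD j 0 +
                  if (G.getD i []).getD j false = true then 1 else 0))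
            (PySem.List.pyGetD P ((i:Int) + 1) []) (List.range (G.getD 0 []).length)))
      (List.replicate (G.length + 1) (List.replicate ((G.getD 0 []).length + 1) (0:Int)))
      (List.range G.length))
      = (List.range (G.length + 1)).map (fun a => (List.range ((G.getD 0 []).length + 1)).map (fun b => rectZ G a b)) := by
    rw [show (List.replicate (G.length + 1) (List.replicate ((G.getD 0 []).length + 1) (0:Int)))
        = (List.range (G.length + 1)).map (fun _ => (List.range ((G.getD 0 []).length + 1)).map (fun _ => (0:Int))) from by
      apply List.ext_getElem (by simp)
      intro n h1 h2
      simp only [List.getElem_replicate, List.getElem_map]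
      apply List.ext_getElem (by simp)
      intro m hm1 hm2
      simp]
    rw [PySem.List.foldl_congr_mem (List.range G.length) _
        (fun P (i : Nat) =>
          P.set (i+1) ((List.range (G.getD 0 []).length).foldl
            (fun Pn (j : Nat) =>
              Pn.set (j+1) ((P.getD i []).getD (j+1) 0 + Pn.getD j 0 - (P.getD i []).getD j 0 +
                (if liveb G i j = true then (1:Int) else 0)))
            (P.getD (i+1) []))) _
        (by
          intro P i _
          dsimp only
          rw [show ((i:Int) + 1) = (((i+1 : Nat)):Int) from by push_cast; ring]
          rw [PySem.List.pySetD_natCast, PySem.List.pyGetD_natCast]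
          congr 1
          rw [PySem.List.foldl_congr_mem (List.range (G.getD 0 []).length) _
              (fun Pn (j : Nat) =>
                Pn.set (j+1) ((P.getD i []).getD (j+1) 0 + Pn.getD j 0 - (P.getD i []).getD j 0 +
                  (if liveb G i j = true then (1:Int) else 0))) _
              (by
                intro Pn j _
                dsimp only
                rw [show ((j:Int) + 1) = (((j+1 : Nat)):Int) from by push_cast; ring]
                rw [PySem.List.pySetD_natCast, PySem.List.pyGetD_natCast]
                simp only [liveb]
                rfl)])]
    rw [pfx_all G G.length (G.getD 0 []).length G.length le_rfl]
    apply List.map_congr_left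
    intro a ha
    exact List.map_congr_left (fun b _ => if_pos (by have := List.mem_range.mp ha; omega))
  rw [hPfold]
  rw [PySem.List.foldl_congr_mem (List.range G.length) _
      (fun (st : Int × List (List Bool)) i =>
        ((((List.range (G.getD 0 []).length).foldl (fun (st2 : Int × List Bool) j =>
            if st2.2.getD j false = true ∧ qB G G.length (G.getD 0 []).length i j = true then (st2.1 + 1, st2.2.set j false) else st2)
          (st.1, st.2.getD i [])).1),
         st.2.set i (((List.range (G.getD 0 []).length).foldl (fun (st2 : Int × List Bool) j =>
            if st2.2.getD j false = true ∧ qB G G.length (G.getD 0 []).length i j = true then (st2.1 + 1, st2.2.set j false) else st2)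
          (st.1, st.2.getD i [])).2))) _
      (by
        intro st i hi
        have hiR : i < G.length := List.mem_range.mp hi
        dsimp only
        rw [show max ((i:Int) - 1) 0 = (((i-1 : Nat)):Int) from by omega,
            show min ((i:Int) + 2) ((G.length : Nat):Int) = (((min (i+2) G.length : Nat)):Int) from by omega]
        simp only [PySem.List.pyGetD_natCast]
        rw [PySem.List.getD_map_range _ _ _ _ (show min (i+2) G.length < G.length + 1 from by omega),
            PySem.List.getD_map_range _ _ _ _ (show i - 1 < G.length + 1 from by omega)]
        congr 2 <;>
        · rw [PySem.List.foldl_congr_mem (List.range (G.getD 0 []).length) _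
              (fun (st2 : Int × List Bool) j =>
                if st2.2.getD j false = true ∧ qB G G.length (G.getD 0 []).length i j = true then (st2.1 + 1, st2.2.set j false) else st2) _
              (by
                intro st2 j hj
                have hjC : j < (G.getD 0 []).length := List.mem_range.mp hj
                dsimp only
                rw [show max ((j:Int) - 1) 0 = (((j-1 : Nat)):Int) from by omega,
                    show min ((j:Int) + 2) (((G.getD 0 []).length : Nat):Int) = (((min (j+2) (G.getD 0 []).length : Nat)):Int) from by omega]
                simp only [PySem.List.pyGetD_natCast]
                rw [PySem.List.getD_map_range _ _ _ _ (show min (j+2) (G.getD 0 []).length < (G.getD 0 []).length + 1 from by omega),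
                    PySem.List.getD_map_range _ _ _ _ (show j - 1 < (G.getD 0 []).length + 1 from by omega)]
                rw [PySem.List.getD_map_range _ _ _ _ (show min (j+2) (G.getD 0 []).length < (G.getD 0 []).length + 1 from by omega),
                    PySem.List.getD_map_range _ _ _ _ (show j - 1 < (G.getD 0 []).length + 1 from by omega)]
                simp only [qB, decide_eq_true_eq]
                unfold blkZ
                split_ifs <;> first | rfl | (exfalso; tauto))])]
  rw [grid_clear_fold G (G.getD 0 []).length (fun i j => qB G G.length (G.getD 0 []).length i j) hC G.length le_rfl 0]
  rw [Prod.mk.injEq]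
  constructor
  · dsimp only
    rw [zero_add]
    unfold canonCnt
    apply congrArg
    apply congrArg
    apply List.map_congr_left
    intro i hi
    apply List.countP_congr
    intro j hj
    rw [qk_eq G G.length (G.getD 0 []).length i j (List.mem_range.mp hi) (List.mem_range.mp hj)]
  · dsimp only
    apply List.ext_getElem (by simp [canonGrid])
    intro n h1 h2
    have hn : n < G.length := by simpa using h1
    simp only [canonGrid, List.getElem_mapIdx]
    rw [if_pos hn]
    apply List.ext_getElem (by simp)
    intro m hm1 hm2
    have hmrow : m < (G[n]).length := by simpa using hm1
    simp only [List.getElem_mapIdx]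
    by_cases hmC : m < (G.getD 0 []).length
    · have hg : (G.getD n []).getD m false = G[n][m] := by
        rw [List.getD_eq_getElem G [] hn, List.getD_eq_getElem _ _ hmrow]
      cases hv : G[n][m] with
      | false =>
        simp
      | true =>
        have hqk : qB G G.length (G.getD 0 []).length n m = keepB G G.length (G.getD 0 []).length n m := by
          have hq := qk_eq G G.length (G.getD 0 []).length n m hn hmC
          rw [hg, hv, Bool.true_and] at hq
          exact hq
        rw [hqk]
    · rw [if_neg (by tauto), if_neg (by tauto)]

-- ===== VERDICT (by name: the statement is the Claim_ definition above) =====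
theorem basic_counting_method_spec : Claim_equal_basic_counting_method := by
  intro grid _ hPre
  unfold Spec_basic_counting_method
  rw [A_char grid hPre, B_char grid hPre]
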